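-- pv_equiv track=rewrite | github.com/EugeneMMF/leetcode | last-moment-before-all-ants-fall-out-of-a-plank.py | getLastMoment
-- ===== SOURCE A (Python) =====
-- from typing import List
--
-- def getLastMoment(n: int, left: List[int], right: List[int]) -> int:
--     max_time = 0
--     for p in left:
--         if p > max_time:
--             max_time = p
--     for p in right:
--         t = n - p
--         if t > max_time:
--             max_time = t
--     return max_time
-- ===== SOURCE B (Python) =====
-- from typing import List
--
-- def getLastMoment(n: int, left: List[int], right: List[int]) -> int:
--     # Divide-and-conquer maximum over the virtual candidate array
--     # cand[i] = left[i] for i < len(left), else n - right[i - len(left)].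
--     m = len(left)
--     total = m + len(right)
--
--     def best(lo: int, hi: int) -> int:
--         if hi - lo == 1:
--             return left[lo] if lo < m else n - right[lo - m]
--         mid = (lo + hi) // 2
--         a = best(lo, mid)
--         b = best(mid, hi)
--         return a if a > b else b
--
--     if total == 0:
--         return 0
--     ans = best(0, total)
--     return ans if ans > 0 else 0
-- ===== Notes on version B (the rewrite author's own statement) =====
-- stated objective: alternative
-- what changed: Replaces A's two sequential running-maximum accumulator loops by a recursive divide-and-conquer maximum over a virtual candidate array (cand[i] = left[i] or n - right[i-len(left)]), merging halves and flooring the result at 0.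
import Mathlib
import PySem

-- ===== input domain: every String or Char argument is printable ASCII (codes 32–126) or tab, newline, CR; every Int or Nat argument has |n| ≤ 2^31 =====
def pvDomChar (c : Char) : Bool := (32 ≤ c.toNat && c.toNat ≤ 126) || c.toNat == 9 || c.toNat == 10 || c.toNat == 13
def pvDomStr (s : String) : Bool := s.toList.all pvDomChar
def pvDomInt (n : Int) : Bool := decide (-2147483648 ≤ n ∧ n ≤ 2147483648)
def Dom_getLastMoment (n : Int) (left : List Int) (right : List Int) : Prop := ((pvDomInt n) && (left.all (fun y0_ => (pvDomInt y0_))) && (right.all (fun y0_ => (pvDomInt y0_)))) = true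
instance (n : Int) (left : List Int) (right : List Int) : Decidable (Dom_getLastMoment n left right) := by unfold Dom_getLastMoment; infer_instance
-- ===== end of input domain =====

-- B replaces A's two accumulator scans by a divide-and-conquer maximum over the
-- virtual candidate array cand[i] = left[i] (i < len(left)) / n - right[i-len(left)]
-- (objective: alternative algorithm, same value; not claimed faster).

-- ===== PORT A =====
def getLastMoment (n : Int) (left : List Int) (right : List Int) : Int :=
  -- max_time = 0; for p in left: if p > max_time: max_time = p
  let m1 := left.foldl (fun mt p => if p > mt then p else mt) 0
  -- for p in right: t = n - p; if t > max_time: max_time = t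
  right.foldl (fun mt p => let t := n - p; if t > mt then t else mt) m1

-- ===== PORT B =====
-- Source B's inner `best(lo, hi)`: divide and conquer over [lo, hi).  The Python
-- recursion always terminates because every call keeps lo < hi; the fuel
-- argument (consumed once per level) only makes the same computation total —
-- the top-level call passes enough fuel for every reachable call.
-- `left[lo]` / `right[lo-m]` are ported with pyGet?; the indices are always in
-- range at every reachable call, so the `.getD 0` totalisation is never taken.
def pvBest (n : Int) (left right : List Int) (fuel : Nat) (lo hi : Int) : Int :=
  match fuel with
  | 0 => 0
  | Nat.succ f =>
    if hi - lo = 1 then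
      if lo < (left.length : Int) then (PySem.List.pyGet? left lo).getD 0
      else n - (PySem.List.pyGet? right (lo - (left.length : Int))).getD 0
    else
      let mid := PySem.Int.floordiv (lo + hi) 2
      let a := pvBest n left right f lo mid
      let b := pvBest n left right f mid hi
      if a > b then a else b

def getLastMoment_alt (n : Int) (left : List Int) (right : List Int) : Int :=
  let m : Int := left.length
  let total : Int := m + right.length
  if total = 0 then 0
  else
    let ans := pvBest n left right total.toNat 0 total
    if ans > 0 then ans else 0

-- ===== PRECONDITION & SPEC =====
def Spec_getLastMoment (n : Int) (left : List Int) (right : List Int) (out : Int) : Prop := out = getLastMoment_alt n left right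
instance (n : Int) (left : List Int) (right : List Int) (out : Int) : Decidable (Spec_getLastMoment n left right out) := by unfold Spec_getLastMoment; infer_instance

-- ===== CLAIM (what is proved, stated in full; the proofs are below) =====
def Claim_equal_getLastMoment : Prop := ∀ (n : Int) (left : List Int) (right : List Int), Dom_getLastMoment n left right → Spec_getLastMoment n left right (getLastMoment n left right)

-- ===== LEMMAS AND PROOFS =====

-- A's left loop is a max-fold
theorem foldl_if_max (l : List Int) (a : Int) :
    l.foldl (fun mt p => if p > mt then p else mt) a = l.foldl max a := by
  induction l generalizing a with
  | nil => rfl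
  | cons x t ih =>
    simp only [List.foldl]
    rw [ih]
    congr 1
    simp only [max_def]
    split_ifs <;> omega

-- A's right loop is a max-fold of (n - p)
theorem foldl_if_sub_max (n : Int) (l : List Int) (a : Int) :
    l.foldl (fun mt p => let t := n - p; if t > mt then t else mt) a
      = (l.map (fun p => n - p)).foldl max a := by
  induction l generalizing a with
  | nil => rfl
  | cons x t ih =>
    simp only [List.foldl, List.map]
    rw [ih]
    congr 1
    simp only [max_def]
    split_ifs <;> omega

-- an upper bound of the elements and the seed bounds a max-fold
theorem foldl_max_le (t : List Int) (a c : Int) (ha : a ≤ c) (h : ∀ x ∈ t, x ≤ c) :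
    t.foldl max a ≤ c := by
  induction t generalizing a with
  | nil => exact ha
  | cons y s ih =>
    simp only [List.foldl]
    exact ih (max a y) (by have := h y (by simp); omega) (fun x hx => h x (by simp [hx]))

-- pvBest over [lo,hi) with enough fuel returns some candidate of the segment
-- and bounds all candidates of the segment
theorem pvBest_spec (n : Int) (left right : List Int) (fuel : Nat) :
    ∀ (lo hi : Int), 0 ≤ lo → lo < hi →
      hi ≤ (((left ++ right.map (fun p => n - p)).length : Nat) : Int) →
      (hi - lo).toNat ≤ fuel →
      (∃ i : Nat, lo ≤ (i : Int) ∧ (i : Int) < hi ∧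
        ∃ h : i < (left ++ right.map (fun p => n - p)).length,
          pvBest n left right fuel lo hi = (left ++ right.map (fun p => n - p))[i]) ∧
      (∀ i : Nat, lo ≤ (i : Int) → (i : Int) < hi →
        ∀ h : i < (left ++ right.map (fun p => n - p)).length,
          (left ++ right.map (fun p => n - p))[i] ≤ pvBest n left right fuel lo hi) := by
  induction fuel with
  | zero => intro lo hi h0 hlt hle hf; omega
  | succ f ih =>
    intro lo hi h0 hlt hle hf
    have hlen : (left ++ right.map (fun p => n - p)).length = left.length + right.length := by
      simp
    by_cases hleaf : hi - lo = 1
    · -- leaf: the single candidate at index lo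
      have hiLt : lo < (((left ++ right.map (fun p => n - p)).length : Nat) : Int) := by omega
      have hiNat : lo.toNat < (left ++ right.map (fun p => n - p)).length := by omega
      have hval : pvBest n left right (f+1) lo hi
          = (left ++ right.map (fun p => n - p))[lo.toNat] := by
        simp only [pvBest, if_pos hleaf]
        by_cases hl : lo < (left.length : Int)
        · rw [if_pos hl,
            PySem.List.pyGet?_eq_some_getElem left h0 (by exact_mod_cast hl)]
          simp only [Option.getD_some]
          rw [List.getElem_append_left (by omega)]
        · rw [if_neg hl,
            PySem.List.pyGet?_eq_some_getElem right (by omega) (by omega)]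
          simp only [Option.getD_some]
          rw [List.getElem_append_right (by omega)]
          rw [List.getElem_map]
          congr 2
          omega
      constructor
      · exact ⟨lo.toNat, by omega, by omega, hiNat, hval⟩
      · intro i hil hih hmem
        have : i = lo.toNat := by omega
        subst this
        rw [hval]
      -- merge: split at the floor midpoint
    · have hmid : PySem.Int.floordiv (lo + hi) 2 = (lo + hi) / 2 :=
        PySem.Int.floordiv_eq_ediv_of_pos (by norm_num)
      have hb1 : lo + 1 ≤ (lo + hi) / 2 := by omega
      have hb2 : (lo + hi) / 2 + 1 ≤ hi := by omega
      obtain ⟨⟨i1, hi1l, hi1h, hm1, he1⟩, hub1⟩ :=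
        ih lo ((lo + hi) / 2) h0 (by omega) (by omega) (by omega)
      obtain ⟨⟨i2, hi2l, hi2h, hm2, he2⟩, hub2⟩ :=
        ih ((lo + hi) / 2) hi (by omega) (by omega) hle (by omega)
      have hstep : pvBest n left right (f+1) lo hi =
          (if pvBest n left right f lo ((lo + hi) / 2) > pvBest n left right f ((lo + hi) / 2) hi
           then pvBest n left right f lo ((lo + hi) / 2)
           else pvBest n left right f ((lo + hi) / 2) hi) := by
        simp only [pvBest, if_neg hleaf, hmid]
      constructor
      · rw [hstep]
        split_ifs with hab
        · exact ⟨i1, hi1l, by omega, hm1, he1⟩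
        · exact ⟨i2, by omega, hi2h, hm2, he2⟩
      · intro i hil hih hmem
        rw [hstep]
        by_cases hc : (i : Int) < (lo + hi) / 2
        · have := hub1 i hil hc hmem
          split_ifs with hab <;> omega
        · have := hub2 i (by omega) hih hmem
          split_ifs with hab <;> omega

-- ===== VERDICT (by name: the statement is the Claim_ definition above) =====
theorem getLastMoment_spec : Claim_equal_getLastMoment := by
  intro n left right _
  unfold Spec_getLastMoment getLastMoment getLastMoment_alt
  simp only []
  rw [foldl_if_max, foldl_if_sub_max, ← List.foldl_append]
  have hlen : (left ++ right.map (fun p => n - p)).length = left.length + right.length := by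
    simp
  by_cases h0 : (left.length : Int) + (right.length : Int) = 0
  · rw [if_pos h0]
    have : left ++ right.map (fun p => n - p) = [] := by
      rw [List.eq_nil_iff_length_eq_zero]; omega
    rw [this]; rfl
  · rw [if_neg h0]
    obtain ⟨⟨i, hil, hih, hm, he⟩, hub⟩ :=
      pvBest_spec n left right ((left.length : Int) + (right.length : Int)).toNat
        0 ((left.length : Int) + (right.length : Int)) (le_refl 0) (by omega)
        (by omega) (by omega)
    apply le_antisymm
    · apply foldl_max_le
      · split_ifs <;> omega
      · intro x hx
        obtain ⟨j, hj, rfl⟩ := List.mem_iff_getElem.mp hx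
        have := hub j (by omega) (by omega) hj
        split_ifs <;> omega
    · have hz := (PySem.List.le_foldl_max (left ++ right.map (fun p => n - p)) 0).1
      have hmem := (PySem.List.le_foldl_max (left ++ right.map (fun p => n - p)) 0).2
        _ (List.getElem_mem hm)
      rw [← he] at hmem
      split_ifs <;> omega
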